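-- pv_equiv track=rewrite | github.com/jmcpeak/algorithms | 1_bfs.py | bfs
-- ===== SOURCE A (Python) =====
-- def bfs(adj, s):
--     level = {s: 0}
--     parent = {s: None}
--
--     i = 1
--     frontier = [s]
--
--     while frontier:
--         next = []
--         for u in frontier:
--             for v in adj.get(u):
--                 if level.get(v) == None:
--                     level[v] = i
--                     parent[v] = u
--                     next.append(v)
--         frontier = next
--         i += 1
--
--     return {
--         'level': level,
--         'parent': parent
--     }
-- ===== SOURCE B (Python) =====
-- def bfs(adj, s):
--     level = {s: 0}
--     parent = {s: None}
--     queue = [s]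
--     while queue:
--         u = queue.pop(0)
--         lvl = level[u] + 1
--         for v in adj[u]:
--             if v not in level:
--                 level[v] = lvl
--                 parent[v] = u
--                 queue.append(v)
--     return {'level': level, 'parent': parent}
-- ===== Notes on version B (the rewrite author's own statement) =====
-- stated objective: simpler
-- what changed: A's wave-by-wave BFS (inner frontier loop building a 'next' list plus an explicit level counter i) is replaced by a single FIFO queue popped one vertex at a time, each vertex's level derived from its parent's level.
import Mathlib
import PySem

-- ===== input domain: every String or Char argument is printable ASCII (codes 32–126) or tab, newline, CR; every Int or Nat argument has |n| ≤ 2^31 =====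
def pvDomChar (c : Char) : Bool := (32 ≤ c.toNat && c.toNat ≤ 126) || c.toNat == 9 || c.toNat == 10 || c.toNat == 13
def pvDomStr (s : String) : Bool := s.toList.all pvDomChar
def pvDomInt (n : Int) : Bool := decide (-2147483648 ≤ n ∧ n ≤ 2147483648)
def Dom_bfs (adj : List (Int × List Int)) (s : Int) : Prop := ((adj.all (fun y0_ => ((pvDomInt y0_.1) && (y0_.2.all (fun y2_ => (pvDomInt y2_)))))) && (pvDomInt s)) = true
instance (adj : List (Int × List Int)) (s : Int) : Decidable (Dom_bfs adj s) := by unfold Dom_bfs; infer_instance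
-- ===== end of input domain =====

-- B replaces A's wave-by-wave frontier loop (explicit level counter i) with a single FIFO
-- queue popped one vertex at a time, deriving each level from the parent's level (objective: simpler).


-- ===== PORT A =====
-- adjacency lookup: Python's adj.get(u) (A) / adj[u] (B); under Pre_bfs every looked-up key is
-- present, so the `.getD []` is only a totalisation guard (Python raises outside Pre_bfs).
def pvAdjGet (adj : List (Int × List Int)) (u : Int) : List Int :=
  ((PySem.Dict.mk adj).get? u).getD []

-- number of (occurrences of) listed vertices not yet in the level dict: termination measure
def pvUnseen (adj : List (Int × List Int)) (lv : PySem.Dict Int Int) : Nat :=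
  ((adj.flatMap (fun p => p.2)).filter (fun v => (lv.get? v).isNone)).length

-- inner loop of A: `for v in adj.get(u): if level.get(v) == None: …`, accumulating `next`
def bfsInnerA (i u : Int) (lv : PySem.Dict Int Int) (pa : PySem.Dict Int (Option Int))
    (nxt : List Int) : List Int → (PySem.Dict Int Int) × (PySem.Dict Int (Option Int)) × List Int
  | [] => (lv, pa, nxt)
  | v :: vs =>
    if lv.get? v = none then
      bfsInnerA i u (lv.insert v i) (pa.insert v (some u)) (nxt ++ [v]) vs
    else
      bfsInnerA i u lv pa nxt vs

-- middle loop of A: `for u in frontier: …`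
def bfsWaveA (adj : List (Int × List Int)) (i : Int) (lv : PySem.Dict Int Int)
    (pa : PySem.Dict Int (Option Int)) (nxt : List Int) :
    List Int → (PySem.Dict Int Int) × (PySem.Dict Int (Option Int)) × List Int
  | [] => (lv, pa, nxt)
  | u :: us =>
    let r := bfsInnerA i u lv pa nxt (pvAdjGet adj u)
    bfsWaveA adj i r.1 r.2.1 r.2.2 us

-- termination facts for the outer loops (cited by `decreasing_by`, hence above the defs)
theorem pvAdjGet_subset (adj : List (Int × List Int)) (u : Int) :
    ∀ v ∈ pvAdjGet adj u, v ∈ adj.flatMap (fun p => p.2) := by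
  induction adj with
  | nil => simp [pvAdjGet, PySem.Dict.get?]
  | cons p rest ih =>
    obtain ⟨k, l⟩ := p
    intro v hv
    simp only [pvAdjGet, PySem.Dict.get?_mk_cons] at hv
    by_cases h : (k == u) = true
    · simp only [h, if_pos] at hv
      simp only [List.flatMap_cons, List.mem_append]
      left; simpa using hv
    · simp only [h] at hv
      simp only [Bool.false_eq_true, if_false] at hv
      simp only [List.flatMap_cons, List.mem_append]
      right; exact ih v hv

theorem pvUnseen_insert_lt (adj : List (Int × List Int)) (lv : PySem.Dict Int Int)
    (v : Int) (i : Int) (hv : v ∈ adj.flatMap (fun p => p.2)) (hnew : lv.get? v = none) :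
    pvUnseen adj (lv.insert v i) < pvUnseen adj lv := by
  unfold pvUnseen
  have hsub : ∀ x : Int, (((lv.insert v i).get? x).isNone = true) → ((lv.get? x).isNone = true) := by
    intro x hx
    by_cases hxv : x = v
    · subst hxv; simp [PySem.Dict.get?_insert_self] at hx
    · rwa [PySem.Dict.get?_insert_of_ne _ _ hxv] at hx
  have h1 : (adj.flatMap (fun p => p.2)).filter (fun x => ((lv.insert v i).get? x).isNone) =
      ((adj.flatMap (fun p => p.2)).filter (fun x => (lv.get? x).isNone)).filter
        (fun x => ((lv.insert v i).get? x).isNone) := by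
    rw [List.filter_filter]
    apply List.filter_congr
    intro x _
    by_cases hx : ((lv.insert v i).get? x).isNone = true
    · simp [hx, hsub x hx]
    · simp [Bool.eq_false_iff.mpr hx]
  rw [h1]
  apply List.length_filter_lt_length_iff_exists.mpr
  refine ⟨v, ?_, ?_⟩
  · simp [List.mem_filter, hv, hnew]
  · simp [PySem.Dict.get?_insert_self]

theorem bfsInnerA_unseen (adj : List (Int × List Int)) (i u : Int) :
    ∀ (cs : List Int) (lv : PySem.Dict Int Int) (pa : PySem.Dict Int (Option Int)) (nxt : List Int),
    (∀ v ∈ cs, v ∈ adj.flatMap (fun p => p.2)) →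
    pvUnseen adj (bfsInnerA i u lv pa nxt cs).1 + (bfsInnerA i u lv pa nxt cs).2.2.length ≤
      pvUnseen adj lv + nxt.length := by
  intro cs
  induction cs with
  | nil => intro lv pa nxt _; simp [bfsInnerA]
  | cons v vs ih =>
    intro lv pa nxt hcs
    simp only [bfsInnerA]
    by_cases hv : lv.get? v = none
    · simp only [hv, if_pos]
      have hlt := pvUnseen_insert_lt adj lv v i (hcs v (by simp)) hv
      have hih := ih (lv.insert v i) (pa.insert v (some u)) (nxt ++ [v])
        (fun x hx => hcs x (by simp [hx]))
      simp only [List.length_append, List.length_cons, List.length_nil] at hih ⊢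
      omega
    · simp only [hv, if_false]
      exact ih lv pa nxt (fun x hx => hcs x (by simp [hx]))

theorem bfsWaveA_unseen (adj : List (Int × List Int)) (i : Int) :
    ∀ (us : List Int) (lv : PySem.Dict Int Int) (pa : PySem.Dict Int (Option Int)) (nxt : List Int),
    pvUnseen adj (bfsWaveA adj i lv pa nxt us).1 + (bfsWaveA adj i lv pa nxt us).2.2.length ≤
      pvUnseen adj lv + nxt.length := by
  intro us
  induction us with
  | nil => intro lv pa nxt; simp [bfsWaveA]
  | cons u us ih =>
    intro lv pa nxt
    simp only [bfsWaveA]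
    have h1 := bfsInnerA_unseen adj i u (pvAdjGet adj u) lv pa nxt (pvAdjGet_subset adj u)
    have h2 := ih (bfsInnerA i u lv pa nxt (pvAdjGet adj u)).1
      (bfsInnerA i u lv pa nxt (pvAdjGet adj u)).2.1 (bfsInnerA i u lv pa nxt (pvAdjGet adj u)).2.2
    omega

-- outer loop of A: `while frontier: … frontier = next; i += 1`
def bfsLoopA (adj : List (Int × List Int)) (lv : PySem.Dict Int Int)
    (pa : PySem.Dict Int (Option Int)) (frontier : List Int) (i : Int) :
    (PySem.Dict Int Int) × (PySem.Dict Int (Option Int)) :=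
  match frontier with
  | [] => (lv, pa)
  | u :: us =>
    let r := bfsWaveA adj i lv pa [] (u :: us)
    bfsLoopA adj r.1 r.2.1 r.2.2 (i + 1)
termination_by 2 * pvUnseen adj lv + frontier.length
decreasing_by
  have h := bfsWaveA_unseen adj i (u :: us) lv pa []
  simp only [List.length_nil] at h
  simp only [List.length_cons]
  omega

def bfs (adj : List (Int × List Int)) (s : Int) : List (String × List (Int × Option Int)) :=
  let lv : PySem.Dict Int Int := PySem.Dict.empty.insert s 0
  let pa : PySem.Dict Int (Option Int) := PySem.Dict.empty.insert s none
  let r := bfsLoopA adj lv pa [s] 1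
  [("level", r.1.items.map (fun p => (p.1, some p.2))), ("parent", r.2.items)]

-- ===== PORT B =====
-- inner loop of B: `for v in adj[u]: if v not in level: …` (lvl = level[u] + 1, hoisted in Source B)
def bfsInnerB (lvl u : Int) (lv : PySem.Dict Int Int) (pa : PySem.Dict Int (Option Int))
    (q : List Int) : List Int → (PySem.Dict Int Int) × (PySem.Dict Int (Option Int)) × List Int
  | [] => (lv, pa, q)
  | v :: vs =>
    if lv.contains v then
      bfsInnerB lvl u lv pa q vs
    else
      bfsInnerB lvl u (lv.insert v lvl) (pa.insert v (some u)) (q ++ [v]) vs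

-- cited by bfsLoopB's decreasing_by, hence above it
theorem bfsInnerB_eq (lvl u : Int) :
    ∀ (cs : List Int) (lv : PySem.Dict Int Int) (pa : PySem.Dict Int (Option Int)) (q : List Int),
    bfsInnerB lvl u lv pa q cs = bfsInnerA lvl u lv pa q cs := by
  intro cs
  induction cs with
  | nil => intro lv pa q; rfl
  | cons v vs ih =>
    intro lv pa q
    simp only [bfsInnerB, bfsInnerA, PySem.Dict.contains_eq_isSome_get?]
    by_cases hv : lv.get? v = none
    · simp [hv, ih]
    · simp [hv, Option.isSome_iff_ne_none.mpr hv, ih]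

-- single-queue loop of B: `while queue: u = queue.pop(0); …`
def bfsLoopB (adj : List (Int × List Int)) (lv : PySem.Dict Int Int)
    (pa : PySem.Dict Int (Option Int)) (q : List Int) :
    (PySem.Dict Int Int) × (PySem.Dict Int (Option Int)) :=
  match q with
  | [] => (lv, pa)
  | u :: rest =>
    let lvl := lv.getD u 0 + 1
    let r := bfsInnerB lvl u lv pa rest (pvAdjGet adj u)
    bfsLoopB adj r.1 r.2.1 r.2.2
termination_by pvUnseen adj lv + q.length
decreasing_by
  rw [bfsInnerB_eq]
  have h := bfsInnerA_unseen adj (lv.getD u 0 + 1) u (pvAdjGet adj u) lv pa rest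
    (pvAdjGet_subset adj u)
  simp only [List.length_cons]
  omega

def bfs_alt (adj : List (Int × List Int)) (s : Int) : List (String × List (Int × Option Int)) :=
  let lv : PySem.Dict Int Int := PySem.Dict.empty.insert s 0
  let pa : PySem.Dict Int (Option Int) := PySem.Dict.empty.insert s none
  let r := bfsLoopB adj lv pa [s]
  [("level", r.1.items.map (fun p => (p.1, some p.2))), ("parent", r.2.items)]

-- ===== PRECONDITION & SPEC =====
-- Pre_bfs: exactly the inputs on which Python A returns normally — every vertex reachable
-- from s along adjacency edges has an entry in adj (A raises TypeError iterating
-- adj.get(u) = None on the first reachable vertex u without one; B raises KeyError there).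
-- Stated abstractly via Relation.ReflTransGen; decided by the pvSat saturation below.
def pvEdge (adj : List (Int × List Int)) (u v : Int) : Prop := v ∈ pvAdjGet adj u

def pvSat (adj : List (Int × List Int)) : Nat → List Int → List Int
  | 0, S => S
  | n + 1, S =>
    let S' := PySem.Set.update S (S.flatMap (pvAdjGet adj))
    if S' = S then S else pvSat adj n S'

def pvReach (adj : List (Int × List Int)) (s : Int) : List Int :=
  pvSat adj (s :: adj.flatMap (fun p => p.2)).length [s]

def pvClosed (adj : List (Int × List Int)) (S : List Int) : Prop :=
  ∀ a ∈ S, ∀ b ∈ pvAdjGet adj a, b ∈ S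

theorem pvSat_mono (adj : List (Int × List Int)) :
    ∀ (n : Nat) (S : List Int), ∀ x ∈ S, x ∈ pvSat adj n S := by
  intro n
  induction n with
  | zero => intro S x hx; simpa [pvSat] using hx
  | succ n ih =>
    intro S x hx
    simp only [pvSat]
    split
    · exact hx
    · exact ih _ x ((PySem.Set.mem_update _ _ _).mpr (Or.inl hx))

theorem pvSat_sound (adj : List (Int × List Int)) (s : Int) :
    ∀ (n : Nat) (S : List Int),
    (∀ x ∈ S, Relation.ReflTransGen (pvEdge adj) s x) →
    ∀ v ∈ pvSat adj n S, Relation.ReflTransGen (pvEdge adj) s v := by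
  intro n
  induction n with
  | zero => intro S h v hv; exact h v (by simpa [pvSat] using hv)
  | succ n ih =>
    intro S h v hv
    simp only [pvSat] at hv
    split at hv
    · exact h v hv
    · refine ih _ ?_ v hv
      intro x hx
      rcases (PySem.Set.mem_update _ _ _).mp hx with hx | hx
      · exact h x hx
      · rcases List.mem_flatMap.mp hx with ⟨a, ha, hxa⟩
        exact Relation.ReflTransGen.tail (h a ha) hxa

theorem pvSat_closed (adj : List (Int × List Int)) (U : List Int)
    (hU : ∀ a b : Int, b ∈ pvAdjGet adj a → b ∈ U) :
    ∀ (n : Nat) (S : List Int), S.Nodup → (∀ x ∈ S, x ∈ U) →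
    U.length + 1 ≤ n + S.length → pvClosed adj (pvSat adj n S) := by
  intro n
  induction n with
  | zero =>
    intro S hnd hsub hlen
    have := ((hnd.subperm hsub).length_le)
    omega
  | succ n ih =>
    intro S hnd hsub hlen
    simp only [pvSat]
    split
    · rename_i hfix
      intro a ha b hb
      have : b ∈ PySem.Set.update S (S.flatMap (pvAdjGet adj)) :=
        (PySem.Set.mem_update _ _ _).mpr (Or.inr (List.mem_flatMap.mpr ⟨a, ha, hb⟩))
      rwa [hfix] at this
    · rename_i hfix
      have heq := PySem.Set.update_eq_append_filter S (S.flatMap (pvAdjGet adj))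
      have hlen' : S.length + 1 ≤ (PySem.Set.update S (S.flatMap (pvAdjGet adj))).length := by
        rw [heq, List.length_append]
        rcases Nat.eq_zero_or_pos (List.filter (fun y => !PySem.Set.contains S y)
            (PySem.Set.ofList (S.flatMap (pvAdjGet adj)))).length with h0 | h0
        · exfalso; apply hfix
          rw [heq, List.length_eq_zero_iff.mp h0, List.append_nil]
        · omega
      apply ih
      · exact PySem.Set.nodup_update _ _ hnd
      · intro x hx
        rcases (PySem.Set.mem_update _ _ _).mp hx with hx | hx
        · exact hsub x hx
        · rcases List.mem_flatMap.mp hx with ⟨a, _, hxa⟩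
          exact hU a x hxa
      · omega

theorem pvReach_complete (adj : List (Int × List Int)) (s v : Int)
    (h : Relation.ReflTransGen (pvEdge adj) s v) : v ∈ pvReach adj s := by
  induction h with
  | refl => exact pvSat_mono adj _ [s] s (by simp)
  | tail _ hbc ih =>
    have hcl : pvClosed adj (pvReach adj s) := by
      apply pvSat_closed adj (s :: adj.flatMap (fun p => p.2))
      · intro a b hb; exact List.mem_cons_of_mem _ (pvAdjGet_subset adj a b hb)
      · simp
      · intro x hx; simp only [List.mem_singleton] at hx; subst hx; simp
      · simp
    exact hcl _ ih _ hbc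

theorem pvReach_sound (adj : List (Int × List Int)) (s v : Int)
    (h : v ∈ pvReach adj s) : Relation.ReflTransGen (pvEdge adj) s v := by
  apply pvSat_sound adj s _ [s] _ v h
  intro x hx
  simp only [List.mem_singleton] at hx; subst hx
  exact Relation.ReflTransGen.refl

def Pre_bfs (adj : List (Int × List Int)) (s : Int) : Prop :=
  ∀ v : Int, Relation.ReflTransGen (pvEdge adj) s v →
    ((PySem.Dict.mk adj).get? v).isSome = true

instance (adj : List (Int × List Int)) (s : Int) : Decidable (Pre_bfs adj s) :=
  decidable_of_iff (∀ v ∈ pvReach adj s, ((PySem.Dict.mk adj).get? v).isSome = true)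
    ⟨fun h v hr => h v (pvReach_complete adj s v hr),
     fun h v hv => h v (pvReach_sound adj s v hv)⟩

def pvWitness_bfs : (List (Int × List Int)) × Int := ([(0, [1, 2]), (1, [0]), (2, [])], 0)

def Spec_bfs (adj : List (Int × List Int)) (s : Int) (out : List (String × List (Int × Option Int))) : Prop := out = bfs_alt adj s
instance (adj : List (Int × List Int)) (s : Int) (out : List (String × List (Int × Option Int))) : Decidable (Spec_bfs adj s out) := by unfold Spec_bfs; infer_instance

-- ===== CLAIM (what is proved, stated in full; the proofs are below) =====
def Claim_equal_bfs : Prop := ∀ (adj : List (Int × List Int)) (s : Int), Dom_bfs adj s → Pre_bfs adj s → Spec_bfs adj s (bfs adj s)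

-- ===== LEMMAS AND PROOFS =====

-- existing level entries survive the inner loop (it only inserts previously absent keys)
theorem bfsInnerA_mono (i u : Int) :
    ∀ (cs : List Int) (lv : PySem.Dict Int Int) (pa : PySem.Dict Int (Option Int)) (nxt : List Int)
    (x : Int) (w : Int), lv.get? x = some w → (bfsInnerA i u lv pa nxt cs).1.get? x = some w := by
  intro cs
  induction cs with
  | nil => intro lv pa nxt x w h; simpa [bfsInnerA] using h
  | cons v vs ih =>
    intro lv pa nxt x w h
    simp only [bfsInnerA]
    by_cases hv : lv.get? v = none
    · simp only [hv, if_pos]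
      apply ih
      have hxv : x ≠ v := by intro he; subst he; rw [h] at hv; exact (Option.some_ne_none w hv).elim
      rw [PySem.Dict.get?_insert_of_ne _ _ hxv]; exact h
    · simp only [hv, if_false]
      exact ih lv pa nxt x w h

-- every vertex in the accumulated `next` list holds level i after the inner loop
theorem bfsInnerA_assigns (i u : Int) :
    ∀ (cs : List Int) (lv : PySem.Dict Int Int) (pa : PySem.Dict Int (Option Int)) (nxt : List Int),
    (∀ v ∈ nxt, lv.get? v = some i) →
    ∀ v ∈ (bfsInnerA i u lv pa nxt cs).2.2, (bfsInnerA i u lv pa nxt cs).1.get? v = some i := by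
  intro cs
  induction cs with
  | nil => intro lv pa nxt h; simpa [bfsInnerA] using h
  | cons v vs ih =>
    intro lv pa nxt h
    simp only [bfsInnerA]
    by_cases hv : lv.get? v = none
    · simp only [hv, if_pos]
      apply ih
      intro x hx
      rcases List.mem_append.mp hx with hx | hx
      · have hxv : x ≠ v := by
          intro he; rw [← he] at hv; rw [h x hx] at hv
          exact (Option.some_ne_none i hv).elim
        rw [PySem.Dict.get?_insert_of_ne _ _ hxv]; exact h x hx
      · simp only [List.mem_singleton] at hx; subst hx
        exact PySem.Dict.get?_insert_self _ _ _
    · simp only [hv, if_false]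
      exact ih lv pa nxt h

theorem bfsWaveA_assigns (adj : List (Int × List Int)) (i : Int) :
    ∀ (us : List Int) (lv : PySem.Dict Int Int) (pa : PySem.Dict Int (Option Int)) (nxt : List Int),
    (∀ v ∈ nxt, lv.get? v = some i) →
    ∀ v ∈ (bfsWaveA adj i lv pa nxt us).2.2, (bfsWaveA adj i lv pa nxt us).1.get? v = some i := by
  intro us
  induction us with
  | nil => intro lv pa nxt h; simpa [bfsWaveA] using h
  | cons u us ih =>
    intro lv pa nxt h
    simp only [bfsWaveA]
    exact ih _ _ _ (bfsInnerA_assigns i u (pvAdjGet adj u) lv pa nxt h)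

-- the `next` accumulator only grows by appending: run with accumulator q = run with [] appended
theorem bfsInnerA_acc (i u : Int) :
    ∀ (cs : List Int) (lv : PySem.Dict Int Int) (pa : PySem.Dict Int (Option Int)) (q : List Int),
    bfsInnerA i u lv pa q cs =
      ((bfsInnerA i u lv pa [] cs).1, (bfsInnerA i u lv pa [] cs).2.1,
        q ++ (bfsInnerA i u lv pa [] cs).2.2) := by
  intro cs
  induction cs with
  | nil => intro lv pa q; simp [bfsInnerA]
  | cons v vs ih =>
    intro lv pa q
    simp only [bfsInnerA]
    by_cases hv : lv.get? v = none
    · simp only [hv, if_pos]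
      rw [ih _ _ (q ++ [v]), ih _ _ ([] ++ [v])]
      simp
    · simp only [hv, if_false]
      exact ih lv pa q

theorem bfsWaveA_acc (adj : List (Int × List Int)) (i : Int) :
    ∀ (us : List Int) (lv : PySem.Dict Int Int) (pa : PySem.Dict Int (Option Int)) (q : List Int),
    bfsWaveA adj i lv pa q us =
      ((bfsWaveA adj i lv pa [] us).1, (bfsWaveA adj i lv pa [] us).2.1,
        q ++ (bfsWaveA adj i lv pa [] us).2.2) := by
  intro us
  induction us with
  | nil => intro lv pa q; simp [bfsWaveA]
  | cons u us ih =>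
    intro lv pa q
    simp only [bfsWaveA]
    rcases h0 : bfsInnerA i u lv pa [] (pvAdjGet adj u) with ⟨lv1, pa1, n1⟩
    rw [bfsInnerA_acc i u (pvAdjGet adj u) lv pa q, h0]
    rw [ih lv1 pa1 (q ++ n1), ih lv1 pa1 n1]
    simp [List.append_assoc]

-- one wave of A = processing its vertices one by one in B's single queue
theorem bfsLoopB_wave (adj : List (Int × List Int)) (i : Int) :
    ∀ (front rest : List Int) (lv : PySem.Dict Int Int) (pa : PySem.Dict Int (Option Int)),
    (∀ u ∈ front, lv.get? u = some (i - 1)) →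
    bfsLoopB adj lv pa (front ++ rest) =
      bfsLoopB adj (bfsWaveA adj i lv pa [] front).1 (bfsWaveA adj i lv pa [] front).2.1
        (rest ++ (bfsWaveA adj i lv pa [] front).2.2) := by
  intro front
  induction front with
  | nil => intro rest lv pa _; simp [bfsWaveA]
  | cons u us ih =>
    intro rest lv pa h
    have hu : lv.getD u 0 = i - 1 :=
      PySem.Dict.getD_of_get?_eq_some _ _ (h u (by simp))
    rw [List.cons_append, bfsLoopB]
    simp only [hu]
    have hlvl : i - 1 + 1 = i := by ring
    rw [hlvl, bfsInnerB_eq]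
    rcases h0 : bfsInnerA i u lv pa [] (pvAdjGet adj u) with ⟨lv1, pa1, n1⟩
    rw [bfsInnerA_acc i u (pvAdjGet adj u) lv pa (us ++ rest), h0]
    have h' : ∀ u' ∈ us, lv1.get? u' = some (i - 1) := by
      intro u' hu'
      have hm := bfsInnerA_mono i u (pvAdjGet adj u) lv pa [] u' (i - 1) (h u' (by simp [hu']))
      rw [h0] at hm; exact hm
    rw [List.append_assoc us rest n1]
    rw [ih (rest ++ n1) lv1 pa1 h']
    simp only [bfsWaveA]
    rw [bfsInnerA_acc i u (pvAdjGet adj u) lv pa [], h0]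
    rcases h1 : bfsWaveA adj i lv1 pa1 [] us with ⟨lv2, pa2, n2⟩
    rw [bfsWaveA_acc adj i us lv1 pa1 ([] ++ n1), h1]
    simp [List.append_assoc]

-- the two loops agree wave by wave
theorem bfsLoop_agree (adj : List (Int × List Int)) :
    ∀ (frontier : List Int) (lv : PySem.Dict Int Int) (pa : PySem.Dict Int (Option Int)) (i : Int),
    (∀ u ∈ frontier, lv.get? u = some (i - 1)) →
    bfsLoopA adj lv pa frontier i = bfsLoopB adj lv pa frontier := by
  intro frontier lv pa i
  induction lv, pa, frontier, i using bfsLoopA.induct adj with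
  | case1 lv pa i => intro _; simp [bfsLoopA, bfsLoopB]
  | case2 lv pa i u us r ih =>
    intro h
    rw [bfsLoopA]
    have hnext : ∀ v ∈ r.2.2, r.1.get? v = some (i + 1 - 1) := by
      have := bfsWaveA_assigns adj i (u :: us) lv pa [] (by simp)
      intro v hv
      have h2 := this v hv
      rw [show i + 1 - 1 = i by ring]
      exact h2
    rw [ih hnext]
    have hw := bfsLoopB_wave adj i (u :: us) [] lv pa h
    simp only [List.append_nil, List.nil_append] at hw
    rw [hw]

-- ===== VERDICT (by name: the statement is the Claim_ definition above) =====
theorem bfs_spec : Claim_equal_bfs := by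
  intro adj s _ _
  unfold Spec_bfs bfs bfs_alt
  simp only []
  have h := bfsLoop_agree adj [s] (PySem.Dict.empty.insert s 0) (PySem.Dict.empty.insert s none) 1
    (by intro u hu; simp only [List.mem_singleton] at hu; subst hu
        rw [PySem.Dict.get?_insert_self]; norm_num)
  simp only [h]
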